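-- pv_equiv track=rewrite | github.com/GirishRPardeshi/Pattern_Explorer | Pattern.py | hollow_diamond
-- ===== SOURCE A (Python) =====
-- def hollow_diamond(rows=5):
--     out = []
--     for i in range(1, rows + 1):
--         row = []
--         row.append(" " * (rows - i))
--         for j in range(1, 2 * i):
--             if j == 1 or j == 2 * i - 1:
--                 row.append("*")
--             else:
--                 row.append(" ")
--         out.append("".join(row))
--     for i in range(rows - 1, 0, -1):
--         row = []
--         row.append(" " * (rows - i))
--         for j in range(1, 2 * i):
--             if j == 1 or j == 2 * i - 1:
--                 row.append("*")
--             else: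
--                 row.append(" ")
--         out.append("".join(row))
--     return "\n".join(out)
-- ===== SOURCE B (Python) =====
-- def hollow_diamond(rows=5):
--     top = [" " * (rows - i) + ("*" if i == 1 else "*" + " " * (2 * i - 3) + "*")
--            for i in range(1, rows + 1)]
--     return "\n".join(top + top[:-1][::-1])
-- ===== Notes on version B (the rewrite author's own statement) =====
-- stated objective: simpler
-- what changed: Builds only the top half of the diamond with a per-row closed formula (bulk string repetition) and mirrors it via top + top[:-1][::-1], instead of A's two descending loops appending one character at a time.
import Mathlib
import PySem

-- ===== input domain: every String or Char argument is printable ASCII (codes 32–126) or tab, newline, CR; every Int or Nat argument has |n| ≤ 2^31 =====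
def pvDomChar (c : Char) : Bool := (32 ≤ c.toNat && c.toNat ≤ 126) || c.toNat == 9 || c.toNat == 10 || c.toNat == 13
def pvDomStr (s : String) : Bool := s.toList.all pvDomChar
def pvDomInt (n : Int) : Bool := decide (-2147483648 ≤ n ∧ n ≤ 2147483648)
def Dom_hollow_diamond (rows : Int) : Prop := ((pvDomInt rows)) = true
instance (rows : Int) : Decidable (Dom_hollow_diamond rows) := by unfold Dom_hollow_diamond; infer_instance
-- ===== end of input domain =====

-- B builds only the top half with a per-row closed formula and mirrors it, instead of A's two
-- descending loops appending characters one at a time; objective: simpler.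

-- ===== PORT A =====
-- the shared body of A's two loops: build one row character by character and "".join it
def pvRowA (rows i : Int) : List Char :=
  PySem.Chars.join []
    ((PySem.List.pyRange 1 (2*i) 1).foldl
      (fun (row : List (List Char)) j =>
        row ++ [if j = 1 ∨ j = 2*i - 1 then ['*'] else [' ']])
      [List.replicate (rows - i).toNat ' '])

def hollow_diamond (rows : Int) : String :=
  String.ofList (PySem.Chars.join ['\n']
    ((PySem.List.pyRange (rows - 1) 0 (-1)).foldl
      (fun (out : List (List Char)) i => out ++ [pvRowA rows i])
      ((PySem.List.pyRange 1 (rows + 1) 1).foldl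
        (fun (out : List (List Char)) i => out ++ [pvRowA rows i]) [])))

-- ===== PORT B =====
-- one row of B by closed formula
def pvRowB (rows i : Int) : List Char :=
  List.replicate (rows - i).toNat ' ' ++
    (if i = 1 then ['*'] else ['*'] ++ List.replicate (2*i - 3).toNat ' ' ++ ['*'])

def hollow_diamond_alt (rows : Int) : String :=
  let top := (PySem.List.pyRange 1 (rows + 1) 1).map (pvRowB rows)
  -- top[:-1][::-1]: slice to -1 then reverse (slice? xs none none (-1) = some xs.reverse)
  String.ofList (PySem.Chars.join ['\n']
    (top ++ (PySem.List.slice top none (some (-1))).reverse))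

-- ===== PRECONDITION & SPEC =====
def Spec_hollow_diamond (rows : Int) (out : String) : Prop := out = hollow_diamond_alt rows
instance (rows : Int) (out : String) : Decidable (Spec_hollow_diamond rows out) := by unfold Spec_hollow_diamond; infer_instance

-- ===== CLAIM (what is proved, stated in full; the proofs are below) =====
def Claim_equal_hollow_diamond : Prop := ∀ (rows : Int), Dom_hollow_diamond rows → Spec_hollow_diamond rows (hollow_diamond rows)


-- ===== LEMMAS AND PROOFS =====

lemma joinNil (parts : List (List Char)) : PySem.Chars.join [] parts = parts.flatten := by
  induction parts with
  | nil => simp [PySem.Chars.join_nil]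
  | cons p ps ih =>
    cases ps with
    | nil => simp [PySem.Chars.join_singleton]
    | cons q rest => rw [PySem.Chars.join_cons_cons]; simp_all

-- characters of the hollow row pattern, n ≥ 2
lemma rangeMapStar (n : Nat) (hn : 2 ≤ n) :
    (List.range n).map (fun k => if k = 0 ∨ k = n - 1 then '*' else ' ')
      = '*' :: (List.replicate (n - 2) ' ' ++ ['*']) := by
  apply List.ext_getElem
  · simp; omega
  · intro i h1 h2
    simp only [List.getElem_map, List.getElem_range]
    rcases Nat.lt_or_ge i 1 with hi | hi
    · interval_cases i
      simp [List.getElem_cons]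
    · rcases Nat.lt_or_ge i (n - 1) with hlt | hge
      · have hlt2 : i - 1 < n - 2 := by omega
        rw [List.getElem_cons]
        simp only [show ¬ i = 0 by omega, dif_neg, not_false_iff]
        rw [List.getElem_append_left (by simpa using hlt2)]
        simp
        omega
      · have hieq : i = n - 1 := by
          simp at h1; omega
        rw [List.getElem_cons]
        simp only [show ¬ i = 0 by omega, dif_neg, not_false_iff]
        rw [List.getElem_append_right (by simp; omega)]
        simp [hieq]

lemma rowA_eq_rowB (rows i : Int) (hi : 1 ≤ i) : pvRowA rows i = pvRowB rows i := by
  unfold pvRowA pvRowB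
  rw [PySem.List.foldl_append_singleton_eq_map, joinNil]
  simp only [List.flatten_cons, List.flatten_nil, List.append_nil, List.flatten_append]
  rw [show (List.map (fun j => if j = 1 ∨ j = 2*i - 1 then ['*'] else [' '])
        (PySem.List.pyRange 1 (2*i) 1)).flatten
      = List.map (fun j => if j = 1 ∨ j = 2*i - 1 then '*' else ' ')
        (PySem.List.pyRange 1 (2*i) 1) from by
    induction (PySem.List.pyRange 1 (2*i) 1) with
    | nil => simp
    | cons a l ih => simp only [List.map_cons, List.flatten_cons, ih]; split_ifs <;> rfl]
  congr 1
  rw [PySem.List.pyRange_one]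
  set n : Nat := (2*i - 1).toNat with hn
  have hni : (n : Int) = 2*i - 1 := by omega
  rw [List.map_map]
  have hmc : List.map ((fun j => if j = 1 ∨ j = 2*i - 1 then '*' else ' ') ∘ fun k : Nat => 1 + (k : Int))
        (List.range n)
      = List.map (fun k => if k = 0 ∨ k = n - 1 then '*' else ' ') (List.range n) := by
    apply List.map_congr_left
    intro k hk
    have hk' : k < n := List.mem_range.mp hk
    simp only [Function.comp]
    congr 1
    simp only [eq_iff_iff]
    constructor
    · rintro (h | h)
      · left; omega
      · right; omega
    · rintro (h | h)
      · left; omega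
      · right; omega
  rw [hmc]
  by_cases h1 : i = 1
  · rw [show n = 1 from by omega, if_pos h1]
    simp [List.range_succ]
  · have hn2 : 2 ≤ n := by omega
    rw [rangeMapStar n hn2]
    simp only [if_neg h1]
    have h3 : n - 2 = (2*i - 3).toNat := by omega
    rw [h3]
    simp

lemma out_eq (rows : Int) :
    ((PySem.List.pyRange (rows - 1) 0 (-1)).foldl
      (fun (out : List (List Char)) i => out ++ [pvRowA rows i])
      ((PySem.List.pyRange 1 (rows + 1) 1).foldl
        (fun (out : List (List Char)) i => out ++ [pvRowA rows i]) []))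
    = ((PySem.List.pyRange 1 (rows + 1) 1).map (pvRowB rows)) ++
        (PySem.List.slice ((PySem.List.pyRange 1 (rows + 1) 1).map (pvRowB rows))
          none (some (-1))).reverse := by
  rw [PySem.List.foldl_append_singleton_eq_map, PySem.List.foldl_append_singleton_eq_map,
      List.nil_append, PySem.List.slice_to_neg_one, PySem.List.pyRange_neg_one_eq_reverse]
  simp only [zero_add, List.map_reverse]
  have htop : (PySem.List.pyRange 1 (rows + 1) 1).map (pvRowA rows)
      = (PySem.List.pyRange 1 (rows + 1) 1).map (pvRowB rows) := by
    apply List.map_congr_left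
    intro j hj
    exact rowA_eq_rowB rows j (PySem.List.mem_pyRange_one.mp hj).1
  have hhalf : (PySem.List.pyRange 1 rows 1).map (pvRowA rows)
      = ((PySem.List.pyRange 1 (rows + 1) 1).map (pvRowB rows)).dropLast := by
    by_cases hr : 1 ≤ rows
    · rw [PySem.List.pyRange_one_succ_right hr]
      simp only [List.map_append, List.map_cons, List.map_nil]
      rw [List.dropLast_concat]
      apply List.map_congr_left
      intro j hj
      exact rowA_eq_rowB rows j (PySem.List.mem_pyRange_one.mp hj).1
    · rw [PySem.List.pyRange_one_eq_nil (by omega), PySem.List.pyRange_one_eq_nil (by omega)]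
      simp
  rw [show rows - 1 + 1 = rows from by ring, htop, hhalf]

-- ===== VERDICT (by name: the statement is the Claim_ definition above) =====
theorem hollow_diamond_spec : Claim_equal_hollow_diamond := by
  intro rows _
  unfold Spec_hollow_diamond hollow_diamond
  simp only [hollow_diamond_alt]
  rw [out_eq]
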